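-- pv_equiv track=rewrite | github.com/Yehuda-Levy923/Project_Euler | Problems_1-100/Problems_20-29/Problem22.py | find_total_score
-- ===== SOURCE A (Python) =====
-- def sort_names(all_the_names):
--     if len(all_the_names) <= 1:
--         return all_the_names
--     # divide the list into two halves
--     mid = len(all_the_names) // 2
--     left_half = all_the_names[:mid]
--     right_half = all_the_names[mid:]
--     # recursively sort both halves
--     left_half = sort_names(left_half)
--     right_half = sort_names(right_half)
--     # merge the sorted halves
--     return merge(left_half, right_half)
--
-- def merge(left, right):
--     merged_list = []
--     i = 0  # pointer for the left list
--     j = 0  # pointer for the right list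
--
--     # compare elements from both lists and add the smaller one to merged_list
--     while i < len(left) and j < len(right):
--         if left[i] <= right[j]: # lexicographical comparison for strings
--             merged_list.append(left[i])
--             i += 1
--         else:
--             merged_list.append(right[j])
--             j += 1
--
--     # add any remaining elements from the left list
--     while i < len(left):
--         merged_list.append(left[i])
--         i += 1
--
--     # add any remaining elements from the right list
--     while j < len(right):
--         merged_list.append(right[j])
--         j += 1
--
--     return merged_list
--
-- def letter_value(char):
--     return ord(char.upper()) - ord('A') + 1 #ord() gives the Unicode (ASCII) number of the character , upper makes it uppercase
--
-- def give_value_to_names(all_the_names):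
--     name_values = {}
--     for name in all_the_names:
--         total = sum(letter_value(char) for char in name if char.isalpha())
--         name_values[name] = total
--     return name_values
--
-- def find_total_score(all_the_names):
--     sorted_names = sort_names(all_the_names)
--     name_values = give_value_to_names(sorted_names)
--
--     total_score = 0
--     for i, name in enumerate(sorted_names):
--         position = i + 1
--         value = name_values[name]
--         total_score += position * value
--
--     return total_score
-- ===== SOURCE B (Python) =====
-- def find_total_score(all_the_names):
--     return sum(i * sum(ord(c.upper()) - 64 for c in name if c.isalpha())
--                for i, name in enumerate(sorted(all_the_names), 1))
-- ===== Notes on version B (the rewrite author's own statement) =====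
-- stated objective: faster
-- what changed: Replaces the hand-written recursive merge sort and the intermediate name->value dictionary with a single sorted() call and one enumerate pass that computes the weighted sum directly.
import Mathlib
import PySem

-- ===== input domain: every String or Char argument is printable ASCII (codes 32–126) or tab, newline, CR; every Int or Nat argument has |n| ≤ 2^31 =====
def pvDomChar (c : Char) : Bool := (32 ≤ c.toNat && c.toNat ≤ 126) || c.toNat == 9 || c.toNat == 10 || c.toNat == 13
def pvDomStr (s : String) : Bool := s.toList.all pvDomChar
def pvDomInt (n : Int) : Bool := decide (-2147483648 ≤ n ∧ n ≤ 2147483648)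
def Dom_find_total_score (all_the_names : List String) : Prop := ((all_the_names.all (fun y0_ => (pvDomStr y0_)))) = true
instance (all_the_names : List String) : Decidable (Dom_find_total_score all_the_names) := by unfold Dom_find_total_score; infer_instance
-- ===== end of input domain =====

-- B replaces A's hand-written recursive merge sort and the intermediate name->value dictionary with one sorted() call and a single enumerate pass (same asymptotic cost; idiomatic).


-- ===== PORT A =====
-- merge(left, right): the two while loops with pointers i, j become the obvious
-- structural recursion on the unread suffixes left[i:], right[j:]; branch order kept.
def pvMergeA : List String → List String → List String
  | [], right => right
  | left, [] => left
  | a :: l, b :: r =>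
      if a ≤ b then a :: pvMergeA l (b :: r)   -- Python str <= is Lean String ≤ (code-point lexicographic)
      else b :: pvMergeA (a :: l) r

-- sort_names: mid = len // 2 (nonnegative, so Nat division); xs[:mid] / xs[mid:] are
-- take/drop by PySem.List.slice_to / slice_from (0 ≤ mid).
def pvSortNamesA (xs : List String) : List String :=
  if xs.length ≤ 1 then xs
  else
    pvMergeA (pvSortNamesA (xs.take (xs.length / 2))) (pvSortNamesA (xs.drop (xs.length / 2)))
termination_by xs.length
decreasing_by
  · simp; omega
  · simp; omega

-- letter_value(char) = ord(char.upper()) - ord('A') + 1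
def pvLetterValueA (c : Char) : Int := ((PySem.Chars.upperChar c).toNat : Int) - 65 + 1

-- give_value_to_names: dict built by a foldl of inserts; the generator-sum is sum ∘ map over the filtered chars.
def pvGiveValueA (all_the_names : List String) : PySem.Dict String Int :=
  all_the_names.foldl
    (fun d name =>
      d.insert name (((name.toList.filter (fun c => PySem.Chars.isalpha c)).map pvLetterValueA).sum))
    PySem.Dict.empty

def find_total_score (all_the_names : List String) : Int :=
  let sorted_names := pvSortNamesA all_the_names
  let name_values := pvGiveValueA sorted_names
  (PySem.List.enumerate sorted_names 0).foldl
    (fun total_score p => total_score + (p.1 + 1) * (name_values.getD p.2 0)) 0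
  -- name_values[name]: every name of sorted_names is a key of name_values, so getD is exact (no KeyError reachable)

-- ===== PORT B =====
def find_total_score_alt (all_the_names : List String) : Int :=
  ((PySem.List.enumerate (PySem.List.sorted all_the_names (fun x => x) false) 1).map
    (fun p => p.1 *
      ((p.2.toList.filter (fun c => PySem.Chars.isalpha c)).map
        (fun c => ((PySem.Chars.upperChar c).toNat : Int) - 64)).sum)).sum

-- ===== PRECONDITION & SPEC =====
def Spec_find_total_score (all_the_names : List String) (out : Int) : Prop := out = find_total_score_alt all_the_names
instance (all_the_names : List String) (out : Int) : Decidable (Spec_find_total_score all_the_names out) := by unfold Spec_find_total_score; infer_instance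

-- ===== CLAIM (what is proved, stated in full; the proofs are below) =====
def Claim_equal_find_total_score : Prop := ∀ (all_the_names : List String), Dom_find_total_score all_the_names → Spec_find_total_score all_the_names (find_total_score all_the_names)

-- ===== LEMMAS AND PROOFS =====

theorem pvMergeA_perm (l r : List String) : (pvMergeA l r).Perm (l ++ r) := by
  fun_induction pvMergeA with
  | case1 r => simp
  | case2 l h => simp
  | case3 a l b r hle ih => simpa using (ih.cons a)
  | case4 a l b r hle ih =>
      refine (ih.cons b).trans ?_
      exact (List.perm_middle).symm

theorem pvMergeA_mem (l r : List String) (x : String) (h : x ∈ pvMergeA l r) : x ∈ l ∨ x ∈ r := by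
  have := (pvMergeA_perm l r).mem_iff.mp h
  simpa using this

theorem pvMergeA_pairwise (l r : List String)
    (hl : l.Pairwise (· ≤ ·)) (hr : r.Pairwise (· ≤ ·)) :
    (pvMergeA l r).Pairwise (· ≤ ·) := by
  fun_induction pvMergeA with
  | case1 r => exact hr
  | case2 l h => exact hl
  | case3 a l b r hle ih =>
      rw [List.pairwise_cons] at hl
      refine List.pairwise_cons.mpr ⟨?_, ih hl.2 hr⟩
      intro y hy
      rcases pvMergeA_mem _ _ _ hy with h1 | h2
      · exact hl.1 y h1
      · rcases List.mem_cons.mp h2 with h2 | h2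
        · exact h2 ▸ hle
        · exact le_trans hle ((List.pairwise_cons.mp hr).1 y h2)
  | case4 a l b r hlt ih =>
      rw [List.pairwise_cons] at hr
      refine List.pairwise_cons.mpr ⟨?_, ih hl hr.2⟩
      intro y hy
      have hba : b ≤ a := le_of_not_ge (fun h => hlt h)
      rcases pvMergeA_mem _ _ _ hy with h1 | h2
      · rcases List.mem_cons.mp h1 with h1 | h1
        · exact h1 ▸ hba
        · exact le_trans hba ((List.pairwise_cons.mp hl).1 y h1)
      · exact hr.1 y h2

theorem pvSortNamesA_perm (xs : List String) : (pvSortNamesA xs).Perm xs := by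
  fun_induction pvSortNamesA with
  | case1 xs h => exact List.Perm.refl xs
  | case2 xs h ih1 ih2 =>
      refine (pvMergeA_perm _ _).trans ?_
      have := (ih1.append ih2)
      simpa using this

theorem pvSortNamesA_pairwise (xs : List String) : (pvSortNamesA xs).Pairwise (· ≤ ·) := by
  fun_induction pvSortNamesA with
  | case1 xs h =>
      match xs, h with
      | [], _ => simp
      | [a], _ => simp
  | case2 xs h ih1 ih2 => exact pvMergeA_pairwise _ _ ih1 ih2

-- A's merge sort computes exactly Python's sorted(xs): it is a ≤-ordered permutation
theorem pvSortNamesA_eq_sorted (xs : List String) :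
    pvSortNamesA xs = PySem.List.sorted xs (fun x => x) false :=
  (PySem.List.sorted_id_eq_of_perm_of_pairwise _ _
    (pvSortNamesA_perm xs) (pvSortNamesA_pairwise xs)).symm

-- a dict whose values depend only on the key: lookup after the build loop
theorem pvFoldlInsertGetD (f : String → Int) (ns : List String) (d : PySem.Dict String Int)
    (name : String) :
    (ns.foldl (fun d n => d.insert n (f n)) d).getD name 0 =
      if name ∈ ns then f name else d.getD name 0 := by
  induction ns generalizing d with
  | nil => simp
  | cons x t ih =>
      simp only [List.foldl_cons, ih, PySem.Dict.getD_insert, List.mem_cons]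
      by_cases h1 : name ∈ t <;> by_cases h2 : name = x <;> simp [h1, h2]

-- the two per-name scores agree: ord(upper c) - 65 + 1 = ord(upper c) - 64
theorem pvScore_eq (name : String) :
    ((name.toList.filter (fun c => PySem.Chars.isalpha c)).map pvLetterValueA).sum =
    ((name.toList.filter (fun c => PySem.Chars.isalpha c)).map
        (fun c => ((PySem.Chars.upperChar c).toNat : Int) - 64)).sum := by
  congr 1
  exact List.map_congr_left (fun c _ => by unfold pvLetterValueA; ring)

-- shifting enumerate's start by one against the (i+1) weight
theorem pvEnumShift (g : String → Int) (xs : List String) (s : Int) :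
    ((PySem.List.enumerate xs s).map (fun p => (p.1 + 1) * g p.2)).sum =
    ((PySem.List.enumerate xs (s + 1)).map (fun p => p.1 * g p.2)).sum := by
  induction xs generalizing s with
  | nil => simp [PySem.List.enumerate_nil]
  | cons x t ih => simp [PySem.List.enumerate_cons, ih]

theorem pvFinal (all_the_names : List String) :
    find_total_score all_the_names = find_total_score_alt all_the_names := by
  unfold find_total_score find_total_score_alt
  rw [← pvSortNamesA_eq_sorted]
  set s := pvSortNamesA all_the_names with hs
  rw [PySem.List.foldl_congr_mem _ _
      (fun total_score p => total_score + (p.1 + 1) *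
        (((p.2.toList.filter (fun c => PySem.Chars.isalpha c)).map pvLetterValueA).sum)) 0
      (by
        intro acc p hp
        obtain ⟨k, hk, rfl⟩ := (PySem.List.mem_enumerate_iff s 0 p).mp hp
        have hmem : s[k] ∈ s := List.getElem_mem hk
        simp only [pvGiveValueA, pvFoldlInsertGetD, hmem, if_true])]
  rw [PySem.List.foldl_add]
  simp only [zero_add]
  have := pvEnumShift (fun name => ((name.toList.filter (fun c => PySem.Chars.isalpha c)).map pvLetterValueA).sum) s 0
  simp only [zero_add] at this
  rw [this]
  congr 1
  exact List.map_congr_left (fun p _ => by rw [pvScore_eq])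

-- ===== VERDICT (by name: the statement is the Claim_ definition above) =====
theorem find_total_score_spec : Claim_equal_find_total_score := by
  intro all_the_names _
  exact pvFinal all_the_names
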